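-- pv_equiv track=rewrite | github.com/timtingwei/prac | py/mit/mit_lec04.py | p2c
-- ===== SOURCE A (Python) =====
-- def p2c(heads,legs):
--     solution = []
--     solutionFound = False
--     for x in range(heads+1):
--         for z in range(heads+1-x):
--             y = 20 - x - z
--             if (x*4+y*2+z*8 == legs):
--                 print ('pigs count is',x)
--                 print ('chickens count is',y)
--                 print ('spiders count is',z)
--                 solution.append((x,y,z))
--                 solutionFound = True
--     if not solutionFound :print ("There is no solution")
--     return solution
-- ===== SOURCE B (Python) =====
-- def p2c(heads, legs):
--     # O(heads): solve the linear system instead of scanning all (x, z) pairs.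
--     # 4x + 2(20-x-z) + 8z == legs  <=>  2x + 6z == legs - 40, so for each x
--     # there is at most one z = ((legs-40)//2 - x) / 3.
--     solution = []
--     if legs % 2 == 0:
--         c = (legs - 40) // 2
--         for x in range(heads + 1):
--             r = c - x
--             if r % 3 == 0 and 0 <= r // 3 <= heads - x:
--                 z = r // 3
--                 solution.append((x, 20 - x - z, z))
--     if not solution:
--         print("There is no solution")
--     return solution
-- ===== Notes on version B (the rewrite author's own statement) =====
-- stated objective: faster
-- what changed: Replaces the O(heads^2) double scan over all (x,z) pairs with a single O(heads) loop over x that solves the linear equation 2x+6z = legs-40 for the unique candidate z.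
import Mathlib
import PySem

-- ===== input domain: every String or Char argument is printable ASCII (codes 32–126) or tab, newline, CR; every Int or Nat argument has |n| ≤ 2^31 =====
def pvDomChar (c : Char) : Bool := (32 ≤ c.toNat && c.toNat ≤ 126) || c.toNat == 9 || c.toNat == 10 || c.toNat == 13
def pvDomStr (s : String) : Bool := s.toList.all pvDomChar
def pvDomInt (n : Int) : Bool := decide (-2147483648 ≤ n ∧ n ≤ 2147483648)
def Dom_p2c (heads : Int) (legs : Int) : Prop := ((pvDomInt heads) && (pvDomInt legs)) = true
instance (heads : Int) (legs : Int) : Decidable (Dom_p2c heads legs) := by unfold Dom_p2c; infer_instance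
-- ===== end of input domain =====

-- B replaces A's O(heads^2) double scan by one O(heads) loop solving 2x+6z = legs-40 for z;
-- equivalence is about the RETURN value only (both Pythons also print).

-- ===== PORT A =====
def p2c (heads : Int) (legs : Int) : List (Int × Int × Int) :=
  -- solution = [], solutionFound carried as the Bool component (it only controls a print)
  let st : List (Int × Int × Int) × Bool :=
    (PySem.List.pyRange 0 (heads + 1) 1).foldl (fun s x =>
      (PySem.List.pyRange 0 (heads + 1 - x) 1).foldl (fun s z =>
        let y := 20 - x - z
        if x * 4 + y * 2 + z * 8 = legs then (s.1 ++ [(x, y, z)], true) else s) s)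
      ([], false)
  st.1

-- ===== PORT B =====
def p2c_alt (heads : Int) (legs : Int) : List (Int × Int × Int) :=
  if PySem.Int.mod legs 2 = 0 then
    let c := PySem.Int.floordiv (legs - 40) 2
    (PySem.List.pyRange 0 (heads + 1) 1).foldl (fun acc x =>
      let r := c - x
      if PySem.Int.mod r 3 = 0 ∧ 0 ≤ PySem.Int.floordiv r 3 ∧ PySem.Int.floordiv r 3 ≤ heads - x then
        let z := PySem.Int.floordiv r 3
        acc ++ [(x, 20 - x - z, z)]
      else acc) []
  else []

-- ===== PRECONDITION & SPEC =====
def Spec_p2c (heads : Int) (legs : Int) (out : List (Int × Int × Int)) : Prop := out = p2c_alt heads legs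
instance (heads : Int) (legs : Int) (out : List (Int × Int × Int)) : Decidable (Spec_p2c heads legs out) := by unfold Spec_p2c; infer_instance

-- ===== CLAIM (what is proved, stated in full; the proofs are below) =====
def Claim_equal_p2c : Prop := ∀ (heads : Int) (legs : Int), Dom_p2c heads legs → Spec_p2c heads legs (p2c heads legs)

-- ===== LEMMAS AND PROOFS =====

-- a fold of a (list, flag) state whose first component evolves independently of the flag
theorem pv_foldl_fst {α β γ : Type} (F : β × γ → α → β × γ) (G : β → α → β)
    (h : ∀ s x, (F s x).1 = G s.1 x) :
    ∀ (l : List α) (s : β × γ), (l.foldl F s).1 = l.foldl G s.1 := by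
  intro l
  induction l with
  | nil => intro s; rfl
  | cons a t ih => intro s; rw [List.foldl_cons, List.foldl_cons, ih, h]

theorem p2c_spec_aux (heads legs : Int) : p2c heads legs = p2c_alt heads legs := by
  unfold p2c
  rw [pv_foldl_fst
      (G := fun acc x =>
        (PySem.List.pyRange 0 (heads + 1 - x) 1).foldl (fun a z =>
          if x * 4 + (20 - x - z) * 2 + z * 8 = legs then a ++ [(x, 20 - x - z, z)] else a) acc)
      (h := by
        intro s x
        rw [pv_foldl_fst (G := fun a z =>
            if x * 4 + (20 - x - z) * 2 + z * 8 = legs then a ++ [(x, 20 - x - z, z)] else a)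
          (h := by intro s' z; dsimp only; split <;> rfl)])]
  unfold p2c_alt
  by_cases h2 : PySem.Int.mod legs 2 = 0
  · simp only [h2, if_pos]
    have hc : PySem.Int.floordiv (legs - 40) 2 * 2 + PySem.Int.mod (legs - 40) 2 = legs - 40 :=
      PySem.Int.floordiv_mul_add_mod (legs - 40) 2
    have hm40 : PySem.Int.mod (legs - 40) 2 = 0 :=
      (PySem.Int.mod_eq_zero_iff_dvd (legs - 40) 2).mpr
        (by have := (PySem.Int.mod_eq_zero_iff_dvd legs 2).mp h2; omega)
    have hc2 : PySem.Int.floordiv (legs - 40) 2 * 2 = legs - 40 := by omega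
    apply PySem.List.foldl_congr_mem
    intro acc x hx
    have hx' : 0 ≤ x ∧ x < heads + 1 := (PySem.List.mem_pyRange_one).mp hx
    have hz3 : PySem.Int.floordiv (PySem.Int.floordiv (legs - 40) 2 - x) 3 * 3
        + PySem.Int.mod (PySem.Int.floordiv (legs - 40) 2 - x) 3
        = PySem.Int.floordiv (legs - 40) 2 - x :=
      PySem.Int.floordiv_mul_add_mod (PySem.Int.floordiv (legs - 40) 2 - x) 3
    have hm3a : 0 ≤ PySem.Int.mod (PySem.Int.floordiv (legs - 40) 2 - x) 3 :=
      PySem.Int.mod_nonneg (a := PySem.Int.floordiv (legs - 40) 2 - x) (b := 3) (by norm_num)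
    have hm3b : PySem.Int.mod (PySem.Int.floordiv (legs - 40) 2 - x) 3 < 3 :=
      PySem.Int.mod_lt (a := PySem.Int.floordiv (legs - 40) 2 - x) (b := 3) (by norm_num)
    by_cases hP : PySem.Int.mod (PySem.Int.floordiv (legs - 40) 2 - x) 3 = 0
        ∧ 0 ≤ PySem.Int.floordiv (PySem.Int.floordiv (legs - 40) 2 - x) 3
        ∧ PySem.Int.floordiv (PySem.Int.floordiv (legs - 40) 2 - x) 3 ≤ heads - x
    · -- exactly one z in A's inner range satisfies the leg equation, namely (c-x)/3
      obtain ⟨hP1, hP2, hP3⟩ := hP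
      have h30 : PySem.Int.floordiv (PySem.Int.floordiv (legs - 40) 2 - x) 3 * 3
          = PySem.Int.floordiv (legs - 40) 2 - x := by omega
      rw [if_pos ⟨hP1, hP2, hP3⟩]
      rw [PySem.List.foldl_append_ite
          (p := fun z => x * 4 + (20 - x - z) * 2 + z * 8 = legs)
          (f := fun z => (x, 20 - x - z, z))]
      have hfe : (PySem.List.pyRange 0 (heads + 1 - x) 1).filter
            (fun z => decide (x * 4 + (20 - x - z) * 2 + z * 8 = legs))
          = (PySem.List.pyRange 0 (heads + 1 - x) 1).filter
            (fun z => z == PySem.Int.floordiv (PySem.Int.floordiv (legs - 40) 2 - x) 3) := by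
        apply List.filter_congr
        intro z _
        exact decide_eq_decide.mpr (by constructor <;> intro hh <;> omega)
      rw [hfe, List.filter_beq,
          List.count_eq_one_of_mem (PySem.List.nodup_pyRange_one 0 (heads + 1 - x))
            ((PySem.List.mem_pyRange_one).mpr (by omega))]
      rfl
    · rw [if_neg hP]
      rw [PySem.List.foldl_append_ite
          (p := fun z => x * 4 + (20 - x - z) * 2 + z * 8 = legs)
          (f := fun z => (x, 20 - x - z, z))]
      have hfe : (PySem.List.pyRange 0 (heads + 1 - x) 1).filter
            (fun z => decide (x * 4 + (20 - x - z) * 2 + z * 8 = legs)) = [] := by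
        rw [List.filter_eq_nil_iff]
        intro z hz
        have hz' : 0 ≤ z ∧ z < heads + 1 - x := (PySem.List.mem_pyRange_one).mp hz
        simp only [decide_eq_true_eq]
        intro hh
        exact hP (by refine ⟨by omega, by omega, by omega⟩)
      rw [hfe]
      simp
  · -- legs odd: the leg equation 2x + 6z + 40 = legs is never satisfied
    simp only [h2, if_false]
    have hnd : ¬ (2 : Int) ∣ legs := fun hd => h2 ((PySem.Int.mod_eq_zero_iff_dvd legs 2).mpr hd)
    rw [PySem.List.foldl_congr_mem _ _ (fun acc _ => acc) _ ?_, PySem.List.foldl_ignore]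
    intro acc x _
    rw [PySem.List.foldl_append_ite
        (p := fun z => x * 4 + (20 - x - z) * 2 + z * 8 = legs)
        (f := fun z => (x, 20 - x - z, z))]
    have hfe : (PySem.List.pyRange 0 (heads + 1 - x) 1).filter
          (fun z => decide (x * 4 + (20 - x - z) * 2 + z * 8 = legs)) = [] := by
      rw [List.filter_eq_nil_iff]
      intro z _
      simp only [decide_eq_true_eq]
      intro hh
      exact hnd ⟨x + 3 * z + 20, by omega⟩
    rw [hfe]
    simp

-- ===== VERDICT (by name: the statement is the Claim_ definition above) =====
theorem p2c_spec : Claim_equal_p2c := by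
  intro heads legs _
  exact p2c_spec_aux heads legs
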